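-- pv_equiv track=rewrite | github.com/jiecksanguin/BigData_HWK | HWK_1/G029HW1.py | calculate_N3_N7
-- ===== SOURCE A (Python) =====
-- def calculate_N3_N7(cell_sizes, cellSideLength):
--     N3_N7_results = []
--     for cell, size in cell_sizes.items():
--         i, j = cell
--         N3 = 0
--         N7 = 0
--         # Iterate over a 7x7 grid around the cell
--         for di in range(-3, 4):
--             for dj in range(-3, 4):
--                 ni = i + di
--                 nj = j + dj
--                 if (ni, nj) in cell_sizes:
--                     cell_size = cell_sizes[(ni, nj)]
--                     if abs(di) <= 1 and abs(dj) <= 1: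
--                         N3 += cell_size
--                     N7 += cell_size
--         N3_N7_results.append((cell, N3, N7))
--     return N3_N7_results
-- ===== SOURCE B (Python) =====
-- def calculate_N3_N7(cell_sizes, cellSideLength):
--     # Separable two-pass: scatter row-direction partial sums into C3/C7, then
--     # gather 3 (resp. 7) column lookups per cell instead of scanning 9/49 offsets.
--     C3 = {}
--     C7 = {}
--     for (i, j), size in cell_sizes.items():
--         for dj in range(-3, 4):
--             key = (i, j + dj)
--             C7[key] = C7.get(key, 0) + size
--             if -1 <= dj <= 1:
--                 C3[key] = C3.get(key, 0) + size
--     out = []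
--     for (i, j) in cell_sizes:
--         n3 = sum(C3.get((i + di, j), 0) for di in range(-1, 2))
--         n7 = sum(C7.get((i + di, j), 0) for di in range(-3, 4))
--         out.append(((i, j), n3, n7))
--     return out
-- ===== Notes on version B (the rewrite author's own statement) =====
-- stated objective: alternative
-- what changed: A gathers per cell by scanning all 49 (resp. 9) neighbour offsets and looking each up in the dict; B exploits that both box sums are separable: one scatter pass accumulates row-direction partial sums into two dicts C3/C7 (7 updates per cell), then each output needs only 3 resp. 7 column lookups.
import Mathlib
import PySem

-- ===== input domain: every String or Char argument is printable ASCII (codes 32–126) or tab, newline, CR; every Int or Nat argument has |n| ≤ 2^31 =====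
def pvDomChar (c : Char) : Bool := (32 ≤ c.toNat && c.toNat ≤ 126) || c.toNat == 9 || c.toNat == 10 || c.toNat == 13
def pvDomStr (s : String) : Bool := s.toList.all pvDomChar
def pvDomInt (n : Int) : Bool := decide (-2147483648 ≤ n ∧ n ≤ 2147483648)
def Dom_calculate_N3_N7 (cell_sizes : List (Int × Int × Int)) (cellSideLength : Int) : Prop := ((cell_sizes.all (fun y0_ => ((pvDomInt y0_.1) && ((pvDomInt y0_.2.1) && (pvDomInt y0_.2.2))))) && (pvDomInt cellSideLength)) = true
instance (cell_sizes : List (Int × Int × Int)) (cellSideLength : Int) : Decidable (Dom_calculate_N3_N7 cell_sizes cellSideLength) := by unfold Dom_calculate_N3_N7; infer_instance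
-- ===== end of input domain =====

-- B replaces A's 49-offset gather per cell by a separable two-pass (row-direction
-- scatter into two dicts, then 3/7 column lookups per cell); alternative algorithm,
-- same exact output.

-- shared decoding of the `cell_sizes` dict parameter (a Python dict arrives as an
-- association list; Python dict construction = insertion-ordered, last value wins)
def pvToDict (cell_sizes : List (Int × Int × Int)) : PySem.Dict (Int × Int) Int :=
  PySem.Dict.ofList (cell_sizes.map (fun t => ((t.1, t.2.1), t.2.2)))

-- ===== PORT A =====
def calculate_N3_N7 (cell_sizes : List (Int × Int × Int)) (cellSideLength : Int) : List ((Int × Int) × Int × Int) :=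
  let d := pvToDict cell_sizes
  d.items.foldl (fun N3_N7_results cv =>
    let i := cv.1.1
    let j := cv.1.2
    let nn := (PySem.List.pyRange (-3) 4 1).foldl (fun (nn : Int × Int) di =>
      (PySem.List.pyRange (-3) 4 1).foldl (fun (nn : Int × Int) dj =>
        let ni := i + di
        let nj := j + dj
        if d.contains (ni, nj) then
          -- cell_sizes[(ni, nj)]: exact here because it is guarded by the membership test
          let cell_size := d.getD (ni, nj) 0
          ((if di.natAbs ≤ 1 ∧ dj.natAbs ≤ 1 then nn.1 + cell_size else nn.1), nn.2 + cell_size)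
        else nn) nn) ((0 : Int), (0 : Int))
    N3_N7_results ++ [(cv.1, nn.1, nn.2)]) []

-- ===== PORT B =====
def calculate_N3_N7_alt (cell_sizes : List (Int × Int × Int)) (cellSideLength : Int) : List ((Int × Int) × Int × Int) :=
  let d := pvToDict cell_sizes
  let cd := d.items.foldl (fun (cd : PySem.Dict (Int × Int) Int × PySem.Dict (Int × Int) Int) cv =>
    (PySem.List.pyRange (-3) 4 1).foldl (fun cd dj =>
      let key := (cv.1.1, cv.1.2 + dj)
      ((if -1 ≤ dj ∧ dj ≤ 1 then cd.1.insert key (cd.1.getD key 0 + cv.2) else cd.1),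
       cd.2.insert key (cd.2.getD key 0 + cv.2))) cd)
    (PySem.Dict.empty, PySem.Dict.empty)
  d.items.map (fun cv =>
    let i := cv.1.1
    let j := cv.1.2
    (cv.1,
     ((PySem.List.pyRange (-1) 2 1).map (fun di => cd.1.getD (i + di, j) 0)).sum,
     ((PySem.List.pyRange (-3) 4 1).map (fun di => cd.2.getD (i + di, j) 0)).sum))

-- ===== PRECONDITION & SPEC =====
def Spec_calculate_N3_N7 (cell_sizes : List (Int × Int × Int)) (cellSideLength : Int) (out : List ((Int × Int) × Int × Int)) : Prop := out = calculate_N3_N7_alt cell_sizes cellSideLength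
instance (cell_sizes : List (Int × Int × Int)) (cellSideLength : Int) (out : List ((Int × Int) × Int × Int)) : Decidable (Spec_calculate_N3_N7 cell_sizes cellSideLength out) := by unfold Spec_calculate_N3_N7; infer_instance

-- ===== CLAIM (what is proved, stated in full; the proofs are below) =====
def Claim_equal_calculate_N3_N7 : Prop := ∀ (cell_sizes : List (Int × Int × Int)) (cellSideLength : Int), Dom_calculate_N3_N7 cell_sizes cellSideLength → Spec_calculate_N3_N7 cell_sizes cellSideLength (calculate_N3_N7 cell_sizes cellSideLength)

-- ===== LEMMAS AND PROOFS =====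

-- the two literal ranges
lemma pvR7 : PySem.List.pyRange (-3) 4 1 = [-3, -2, -1, 0, 1, 2, 3] := by decide
lemma pvR3 : PySem.List.pyRange (-1) 2 1 = [-1, 0, 1] := by decide

-- fold with componentwise pair state = pair of folds
lemma pvFoldlPair {α β γ : Type} (l : List γ) (f : α → γ → α) (g : β → γ → β) (a : α) (b : β) :
    l.foldl (fun p x => (f p.1 x, g p.2 x)) (a, b) = (l.foldl f a, l.foldl g b) := by
  induction l generalizing a b with
  | nil => rfl
  | cons h t ih => simpa using ih (f a h) (g b h)

-- nested fold with componentwise pair state = pair of nested folds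
lemma pvFoldlPair2 {α β γ δ : Type} (l : List γ) (m : γ → List δ)
    (f : α → γ → δ → α) (g : β → γ → δ → β) (a : α) (b : β) :
    l.foldl (fun p x => (m x).foldl (fun p y => (f p.1 x y, g p.2 x y)) p) (a, b)
      = (l.foldl (fun c x => (m x).foldl (fun c y => f c x y) c) a,
         l.foldl (fun c x => (m x).foldl (fun c y => g c x y) c) b) := by
  induction l generalizing a b with
  | nil => rfl
  | cons h t ih =>
    simp only [List.foldl_cons]
    rw [pvFoldlPair (m h) (fun c y => f c h y) (fun c y => g c h y) a b]
    exact ih _ _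

-- fold of a conditional step = fold over the filtered list
lemma pvFoldlFilter {α γ : Type} (l : List γ) (c : γ → Prop) [DecidablePred c] (f : α → γ → α) (a : α) :
    l.foldl (fun d x => if c x then f d x else d) a = (l.filter (fun x => decide (c x))).foldl f a := by
  induction l generalizing a with
  | nil => rfl
  | cons h t ih =>
    by_cases hc : c h <;> simp [hc, ih]

-- nested fold = fold over the flattened contribution list
lemma pvFoldlFlat {α β γ : Type} (l : List γ) (g : γ → List β) (f : α → β → α) (a : α) :
    l.foldl (fun d x => (g x).foldl f d) a = (l.flatMap g).foldl f a := by
  induction l generalizing a with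
  | nil => rfl
  | cons h t ih => simp [List.flatMap_cons, List.foldl_append, ih]

-- scatter characterisation: getD after a fold of insert-accumulate steps
lemma pvScatter (l : List ((Int × Int) × Int)) (d : PySem.Dict (Int × Int) Int) (k : Int × Int) :
    (l.foldl (fun d p => d.insert p.1 (d.getD p.1 0 + p.2)) d).getD k 0
      = d.getD k 0 + (l.map (fun p => if p.1 = k then p.2 else 0)).sum := by
  induction l generalizing d with
  | nil => simp
  | cons h t ih =>
    simp only [List.foldl_cons, ih, List.map_cons, List.sum_cons,
      PySem.Dict.getD_insert]
    by_cases hk : k = h.1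
    · subst hk
      rw [if_pos rfl, if_pos rfl]
      ring
    · rw [if_neg hk, if_neg (fun he => hk he.symm)]
      ring

-- sum over a flatMap
lemma pvSumFlat {α β : Type} (l : List α) (g : α → List β) (h : β → Int) :
    ((l.flatMap g).map h).sum = (l.map (fun x => ((g x).map h).sum)).sum := by
  induction l with
  | nil => rfl
  | cons a t ih => simp [List.flatMap_cons, ih]

-- interchange of two list sums
lemma pvSumSwap {α β : Type} (l : List α) (m : List β) (f : α → β → Int) :
    (l.map (fun x => (m.map (f x)).sum)).sum = (m.map (fun y => (l.map (fun x => f x y)).sum)).sum := by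
  induction l with
  | nil => simp
  | cons a t ih => simp [ih, List.sum_map_add]

-- a sum of if-then-0 terms with no key match is 0
lemma pvSumZero (l : List ((Int × Int) × Int)) (k : Int × Int) (hk : k ∉ l.map Prod.fst) :
    (l.map (fun p => if p.1 = k then p.2 else 0)).sum = 0 := by
  induction l with
  | nil => rfl
  | cons h t ih =>
    simp only [List.map_cons, List.mem_cons, not_or] at hk ⊢
    rw [List.sum_cons, if_neg (fun he => hk.1 he.symm), ih hk.2, add_zero]

-- gather characterisation: getD of a dict with nodup keys as a sum over its items
lemma pvGetDSum (l : List ((Int × Int) × Int)) (k : Int × Int) (hn : (l.map Prod.fst).Nodup) :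
    (PySem.Dict.mk l).getD k 0 = (l.map (fun p => if p.1 = k then p.2 else 0)).sum := by
  induction l with
  | nil => simp [PySem.Dict.getD_eq_get?_getD]; rfl
  | cons h t ih =>
    simp only [List.map_cons, List.nodup_cons] at hn
    rw [PySem.Dict.getD_eq_get?_getD, PySem.Dict.get?_mk_cons]
    by_cases hk : h.1 = k
    · subst hk
      simp [pvSumZero t h.1 hn.1]
    · simp only [beq_iff_eq, if_neg hk, List.map_cons, List.sum_cons,
        ← PySem.Dict.getD_eq_get?_getD, ih hn.2, zero_add]

-- pull a constant condition inside a sum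
lemma pvIfSum {α : Type} (X : Prop) [Decidable X] (l : List α) (g : α → Int) :
    (if X then (l.map g).sum else 0) = (l.map (fun x => if X then g x else 0)).sum := by
  by_cases hx : X <;> simp [hx]

-- merge nested ifs into one conjunction
lemma pvIfMerge (C : Prop) [Decidable C] (E : Prop) [Decidable E] (v : Int) :
    (if C then (if E then v else 0) else 0) = if C ∧ E then v else 0 := by
  split_ifs <;> tauto

-- ===== literal-range collapse lemmas (proved by exhausting the 7/3 offsets) =====
lemma pvA7dj (i j p1 p2 v di : Int) :
    (([-3, -2, -1, 0, 1, 2, 3] : List Int).map (fun dj => if p1 = i + di ∧ p2 = j + dj then v else 0)).sum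
      = if p1 = i + di ∧ -3 ≤ p2 - j ∧ p2 - j ≤ 3 then v else 0 := by
  simp only [List.map_cons, List.map_nil, List.sum_cons, List.sum_nil]
  split_ifs <;> omega

lemma pvA7di (i j p1 p2 v : Int) :
    (([-3, -2, -1, 0, 1, 2, 3] : List Int).map (fun di => if p1 = i + di ∧ -3 ≤ p2 - j ∧ p2 - j ≤ 3 then v else 0)).sum
      = if -3 ≤ p1 - i ∧ p1 - i ≤ 3 then (if -3 ≤ p2 - j ∧ p2 - j ≤ 3 then v else 0) else 0 := by
  simp only [List.map_cons, List.map_nil, List.sum_cons, List.sum_nil]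
  split_ifs <;> omega

lemma pvA3dj (i j p1 p2 v di : Int) :
    (([-3, -2, -1, 0, 1, 2, 3] : List Int).map (fun dj => if (di.natAbs ≤ 1 ∧ dj.natAbs ≤ 1) ∧ p1 = i + di ∧ p2 = j + dj then v else 0)).sum
      = if di.natAbs ≤ 1 ∧ p1 = i + di ∧ -1 ≤ p2 - j ∧ p2 - j ≤ 1 then v else 0 := by
  simp only [List.map_cons, List.map_nil, List.sum_cons, List.sum_nil]
  split_ifs <;> omega

lemma pvA3di (i j p1 p2 v : Int) :
    (([-3, -2, -1, 0, 1, 2, 3] : List Int).map (fun di => if di.natAbs ≤ 1 ∧ p1 = i + di ∧ -1 ≤ p2 - j ∧ p2 - j ≤ 1 then v else 0)).sum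
      = if -1 ≤ p1 - i ∧ p1 - i ≤ 1 then (if -1 ≤ p2 - j ∧ p2 - j ≤ 1 then v else 0) else 0 := by
  simp only [List.map_cons, List.map_nil, List.sum_cons, List.sum_nil]
  split_ifs <;> omega

lemma pvB7dj (c1 c2 k1 k2 v : Int) :
    (([-3, -2, -1, 0, 1, 2, 3] : List Int).map (fun dj => if c1 = k1 ∧ c2 + dj = k2 then v else 0)).sum
      = if c1 = k1 ∧ -3 ≤ c2 - k2 ∧ c2 - k2 ≤ 3 then v else 0 := by
  simp only [List.map_cons, List.map_nil, List.sum_cons, List.sum_nil]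
  split_ifs <;> omega

lemma pvB3dj (c1 c2 k1 k2 v : Int) :
    (([-1, 0, 1] : List Int).map (fun dj => if c1 = k1 ∧ c2 + dj = k2 then v else 0)).sum
      = if c1 = k1 ∧ -1 ≤ c2 - k2 ∧ c2 - k2 ≤ 1 then v else 0 := by
  simp only [List.map_cons, List.map_nil, List.sum_cons, List.sum_nil]
  split_ifs <;> omega

lemma pvB7di (i j p1 p2 v : Int) :
    (([-3, -2, -1, 0, 1, 2, 3] : List Int).map (fun di => if p1 = i + di ∧ -3 ≤ p2 - j ∧ p2 - j ≤ 3 then v else 0)).sum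
      = if -3 ≤ p1 - i ∧ p1 - i ≤ 3 then (if -3 ≤ p2 - j ∧ p2 - j ≤ 3 then v else 0) else 0 :=
  pvA7di i j p1 p2 v

lemma pvB3di (i j p1 p2 v : Int) :
    (([-1, 0, 1] : List Int).map (fun di => if p1 = i + di ∧ -1 ≤ p2 - j ∧ p2 - j ≤ 1 then v else 0)).sum
      = if -1 ≤ p1 - i ∧ p1 - i ≤ 1 then (if -1 ≤ p2 - j ∧ p2 - j ≤ 1 then v else 0) else 0 := by
  simp only [List.map_cons, List.map_nil, List.sum_cons, List.sum_nil]
  split_ifs <;> omega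

-- fold that appends singletons = map
lemma pvFoldlAppendMap {α β : Type} (l : List α) (f : α → β) (r0 : List β) :
    l.foldl (fun r x => r ++ [f x]) r0 = r0 ++ l.map f := by
  induction l generalizing r0 with
  | nil => simp
  | cons h t ih => simp [ih]

-- ===== the common per-cell target values =====
def pvT3 (l : List ((Int × Int) × Int)) (i j : Int) : Int :=
  (l.map (fun p => if -1 ≤ p.1.1 - i ∧ p.1.1 - i ≤ 1 then (if -1 ≤ p.1.2 - j ∧ p.1.2 - j ≤ 1 then p.2 else 0) else 0)).sum
def pvT7 (l : List ((Int × Int) × Int)) (i j : Int) : Int :=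
  (l.map (fun p => if -3 ≤ p.1.1 - i ∧ p.1.1 - i ≤ 3 then (if -3 ≤ p.1.2 - j ∧ p.1.2 - j ≤ 3 then p.2 else 0) else 0)).sum

-- ===== A's per-cell double loop computes (pvT3, pvT7) =====
lemma pvAcell (d : PySem.Dict (Int × Int) Int) (hn : (d.items.map Prod.fst).Nodup) (i j : Int) :
    ([-3, -2, -1, 0, 1, 2, 3] : List Int).foldl (fun (nn : Int × Int) di =>
      ([-3, -2, -1, 0, 1, 2, 3] : List Int).foldl (fun (nn : Int × Int) dj =>
        if d.contains (i + di, j + dj) then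
          ((if di.natAbs ≤ 1 ∧ dj.natAbs ≤ 1 then nn.1 + d.getD (i + di, j + dj) 0 else nn.1),
           nn.2 + d.getD (i + di, j + dj) 0)
        else nn) nn) ((0 : Int), (0 : Int))
      = (pvT3 d.items i j, pvT7 d.items i j) := by
  have hgetD : ∀ k, d.getD k 0 = (d.items.map (fun p => if p.1 = k then p.2 else 0)).sum :=
    fun k => pvGetDSum d.items k hn
  have hbody : ∀ (di : Int) (nn : Int × Int) (dj : Int),
      (if d.contains (i + di, j + dj) then
        ((if di.natAbs ≤ 1 ∧ dj.natAbs ≤ 1 then nn.1 + d.getD (i + di, j + dj) 0 else nn.1),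
         nn.2 + d.getD (i + di, j + dj) 0)
      else nn)
      = (nn.1 + (if di.natAbs ≤ 1 ∧ dj.natAbs ≤ 1 then d.getD (i + di, j + dj) 0 else 0),
         nn.2 + d.getD (i + di, j + dj) 0) := by
    intro di nn dj
    by_cases hc : d.contains (i + di, j + dj)
    · by_cases ha : di.natAbs ≤ 1 ∧ dj.natAbs ≤ 1 <;> simp [hc, ha]
    · have h0 : d.getD (i + di, j + dj) 0 = 0 :=
        PySem.Dict.getD_of_not_contains d 0 (by simpa using hc)
      simp [hc, h0]
  have hinner : ∀ (nn : Int × Int) (di : Int),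
      ([-3, -2, -1, 0, 1, 2, 3] : List Int).foldl (fun (nn : Int × Int) dj =>
        if d.contains (i + di, j + dj) then
          ((if di.natAbs ≤ 1 ∧ dj.natAbs ≤ 1 then nn.1 + d.getD (i + di, j + dj) 0 else nn.1),
           nn.2 + d.getD (i + di, j + dj) 0)
        else nn) nn
      = (nn.1 + (([-3, -2, -1, 0, 1, 2, 3] : List Int).map (fun dj => if di.natAbs ≤ 1 ∧ dj.natAbs ≤ 1 then d.getD (i + di, j + dj) 0 else 0)).sum,
         nn.2 + (([-3, -2, -1, 0, 1, 2, 3] : List Int).map (fun dj => d.getD (i + di, j + dj) 0)).sum) := by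
    intro nn di
    rw [List.foldl_ext _ (fun (nn : Int × Int) dj =>
        (nn.1 + (if di.natAbs ≤ 1 ∧ dj.natAbs ≤ 1 then d.getD (i + di, j + dj) 0 else 0),
         nn.2 + d.getD (i + di, j + dj) 0)) nn (fun nn dj _ => hbody di nn dj)]
    obtain ⟨a, b⟩ := nn
    rw [pvFoldlPair _ (fun (a : Int) dj => a + (if di.natAbs ≤ 1 ∧ dj.natAbs ≤ 1 then d.getD (i + di, j + dj) 0 else 0))
      (fun (b : Int) dj => b + d.getD (i + di, j + dj) 0) a b]
    rw [PySem.List.foldl_add, PySem.List.foldl_add]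
  rw [List.foldl_ext _ (fun (nn : Int × Int) di =>
      (nn.1 + (([-3, -2, -1, 0, 1, 2, 3] : List Int).map (fun dj => if di.natAbs ≤ 1 ∧ dj.natAbs ≤ 1 then d.getD (i + di, j + dj) 0 else 0)).sum,
       nn.2 + (([-3, -2, -1, 0, 1, 2, 3] : List Int).map (fun dj => d.getD (i + di, j + dj) 0)).sum))
      _ (fun nn di _ => hinner nn di)]
  rw [pvFoldlPair _ (fun (a : Int) di => a + (([-3, -2, -1, 0, 1, 2, 3] : List Int).map (fun dj => if di.natAbs ≤ 1 ∧ dj.natAbs ≤ 1 then d.getD (i + di, j + dj) 0 else 0)).sum)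
      (fun (b : Int) di => b + (([-3, -2, -1, 0, 1, 2, 3] : List Int).map (fun dj => d.getD (i + di, j + dj) 0)).sum) 0 0]
  rw [PySem.List.foldl_add, PySem.List.foldl_add, Prod.mk.injEq]
  constructor
  · -- N3 component
    rw [zero_add]
    have h3a : ∀ di : Int,
        (([-3, -2, -1, 0, 1, 2, 3] : List Int).map (fun dj => if di.natAbs ≤ 1 ∧ dj.natAbs ≤ 1 then d.getD (i + di, j + dj) 0 else 0)).sum
        = (d.items.map (fun p => if di.natAbs ≤ 1 ∧ p.1.1 = i + di ∧ -1 ≤ p.1.2 - j ∧ p.1.2 - j ≤ 1 then p.2 else 0)).sum := by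
      intro di
      have h1 : (([-3, -2, -1, 0, 1, 2, 3] : List Int).map (fun dj => if di.natAbs ≤ 1 ∧ dj.natAbs ≤ 1 then d.getD (i + di, j + dj) 0 else 0))
          = ([-3, -2, -1, 0, 1, 2, 3] : List Int).map (fun dj => (d.items.map (fun p => if (di.natAbs ≤ 1 ∧ dj.natAbs ≤ 1) ∧ p.1.1 = i + di ∧ p.1.2 = j + dj then p.2 else 0)).sum) := by
        refine List.map_congr_left fun dj _ => ?_
        rw [hgetD, pvIfSum]
        refine congrArg List.sum (List.map_congr_left fun p _ => ?_)
        rw [pvIfMerge]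
        exact if_congr (and_congr_right fun _ => Prod.ext_iff) rfl rfl
      rw [h1, pvSumSwap]
      refine congrArg List.sum (List.map_congr_left fun p _ => ?_)
      exact pvA3dj i j p.1.1 p.1.2 p.2 di
    rw [List.map_congr_left fun di _ => h3a di, pvSumSwap]
    exact congrArg List.sum (List.map_congr_left fun p _ => pvA3di i j p.1.1 p.1.2 p.2)
  · -- N7 component
    rw [zero_add]
    have h7a : ∀ di : Int,
        (([-3, -2, -1, 0, 1, 2, 3] : List Int).map (fun dj => d.getD (i + di, j + dj) 0)).sum
        = (d.items.map (fun p => if p.1.1 = i + di ∧ -3 ≤ p.1.2 - j ∧ p.1.2 - j ≤ 3 then p.2 else 0)).sum := by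
      intro di
      have h1 : (([-3, -2, -1, 0, 1, 2, 3] : List Int).map (fun dj => d.getD (i + di, j + dj) 0))
          = ([-3, -2, -1, 0, 1, 2, 3] : List Int).map (fun dj => (d.items.map (fun p => if p.1.1 = i + di ∧ p.1.2 = j + dj then p.2 else 0)).sum) := by
        refine List.map_congr_left fun dj _ => ?_
        rw [hgetD]
        refine congrArg List.sum (List.map_congr_left fun p _ => ?_)
        exact if_congr Prod.ext_iff rfl rfl
      rw [h1, pvSumSwap]
      refine congrArg List.sum (List.map_congr_left fun p _ => ?_)
      exact pvA7dj i j p.1.1 p.1.2 p.2 di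
    rw [List.map_congr_left fun di _ => h7a di, pvSumSwap]
    exact congrArg List.sum (List.map_congr_left fun p _ => pvA7di i j p.1.1 p.1.2 p.2)

-- ===== B's accumulator dicts, characterised =====
def pvC7fold (l : List ((Int × Int) × Int)) : PySem.Dict (Int × Int) Int :=
  l.foldl (fun c cv =>
    ([-3, -2, -1, 0, 1, 2, 3] : List Int).foldl (fun c dj =>
      c.insert (cv.1.1, cv.1.2 + dj) (c.getD (cv.1.1, cv.1.2 + dj) 0 + cv.2)) c) PySem.Dict.empty

def pvC3fold (l : List ((Int × Int) × Int)) : PySem.Dict (Int × Int) Int :=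
  l.foldl (fun c cv =>
    ([-3, -2, -1, 0, 1, 2, 3] : List Int).foldl (fun c dj =>
      if -1 ≤ dj ∧ dj ≤ 1 then c.insert (cv.1.1, cv.1.2 + dj) (c.getD (cv.1.1, cv.1.2 + dj) 0 + cv.2) else c) c) PySem.Dict.empty

lemma pvC7 (l : List ((Int × Int) × Int)) (k : Int × Int) :
    (pvC7fold l).getD k 0
      = (l.map (fun cv => if cv.1.1 = k.1 ∧ -3 ≤ cv.1.2 - k.2 ∧ cv.1.2 - k.2 ≤ 3 then cv.2 else 0)).sum := by
  unfold pvC7fold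
  have h1 : ∀ (c : PySem.Dict (Int × Int) Int) (cv : (Int × Int) × Int),
      ([-3, -2, -1, 0, 1, 2, 3] : List Int).foldl (fun c dj =>
        c.insert (cv.1.1, cv.1.2 + dj) (c.getD (cv.1.1, cv.1.2 + dj) 0 + cv.2)) c
      = (([-3, -2, -1, 0, 1, 2, 3] : List Int).map (fun dj => ((cv.1.1, cv.1.2 + dj), cv.2))).foldl
          (fun c p => c.insert p.1 (c.getD p.1 0 + p.2)) c := by
    intro c cv
    rw [List.foldl_map]
  have h2 := List.foldl_ext _ _ PySem.Dict.empty (l := l) (fun c cv _ => h1 c cv)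
  rw [h2]
  rw [pvFoldlFlat, pvScatter, PySem.Dict.getD_empty, zero_add, pvSumFlat]
  refine congrArg List.sum (List.map_congr_left fun cv _ => ?_)
  rw [List.map_map]
  rw [show (([-3, -2, -1, 0, 1, 2, 3] : List Int).map ((fun p => if p.1 = k then p.2 else 0) ∘ fun dj => ((cv.1.1, cv.1.2 + dj), cv.2)))
      = ([-3, -2, -1, 0, 1, 2, 3] : List Int).map (fun dj => if cv.1.1 = k.1 ∧ cv.1.2 + dj = k.2 then cv.2 else 0) from
    List.map_congr_left fun dj _ => if_congr Prod.ext_iff rfl rfl]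
  exact pvB7dj cv.1.1 cv.1.2 k.1 k.2 cv.2

lemma pvC3 (l : List ((Int × Int) × Int)) (k : Int × Int) :
    (pvC3fold l).getD k 0
      = (l.map (fun cv => if cv.1.1 = k.1 ∧ -1 ≤ cv.1.2 - k.2 ∧ cv.1.2 - k.2 ≤ 1 then cv.2 else 0)).sum := by
  unfold pvC3fold
  have h1 : ∀ (c : PySem.Dict (Int × Int) Int) (cv : (Int × Int) × Int),
      ([-3, -2, -1, 0, 1, 2, 3] : List Int).foldl (fun c dj =>
        if -1 ≤ dj ∧ dj ≤ 1 then c.insert (cv.1.1, cv.1.2 + dj) (c.getD (cv.1.1, cv.1.2 + dj) 0 + cv.2) else c) c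
      = (([-1, 0, 1] : List Int).map (fun dj => ((cv.1.1, cv.1.2 + dj), cv.2))).foldl
          (fun c p => c.insert p.1 (c.getD p.1 0 + p.2)) c := by
    intro c cv
    rw [pvFoldlFilter _ (fun dj => -1 ≤ dj ∧ dj ≤ 1)]
    rw [show (([-3, -2, -1, 0, 1, 2, 3] : List Int).filter (fun dj => decide (-1 ≤ dj ∧ dj ≤ 1))) = ([-1, 0, 1] : List Int) from by decide]
    rw [List.foldl_map]
  have h2 := List.foldl_ext _ _ PySem.Dict.empty (l := l) (fun c cv _ => h1 c cv)
  rw [h2]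
  rw [pvFoldlFlat, pvScatter, PySem.Dict.getD_empty, zero_add, pvSumFlat]
  refine congrArg List.sum (List.map_congr_left fun cv _ => ?_)
  rw [List.map_map]
  rw [show (([-1, 0, 1] : List Int).map ((fun p => if p.1 = k then p.2 else 0) ∘ fun dj => ((cv.1.1, cv.1.2 + dj), cv.2)))
      = ([-1, 0, 1] : List Int).map (fun dj => if cv.1.1 = k.1 ∧ cv.1.2 + dj = k.2 then cv.2 else 0) from
    List.map_congr_left fun dj _ => if_congr Prod.ext_iff rfl rfl]
  exact pvB3dj cv.1.1 cv.1.2 k.1 k.2 cv.2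

-- the one build loop of B splits into the two accumulator folds
lemma pvBuildSplit (l : List ((Int × Int) × Int)) :
    l.foldl (fun (cd : PySem.Dict (Int × Int) Int × PySem.Dict (Int × Int) Int) cv =>
      ([-3, -2, -1, 0, 1, 2, 3] : List Int).foldl (fun cd dj =>
        ((if -1 ≤ dj ∧ dj ≤ 1 then cd.1.insert (cv.1.1, cv.1.2 + dj) (cd.1.getD (cv.1.1, cv.1.2 + dj) 0 + cv.2) else cd.1),
         cd.2.insert (cv.1.1, cv.1.2 + dj) (cd.2.getD (cv.1.1, cv.1.2 + dj) 0 + cv.2))) cd)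
      (PySem.Dict.empty, PySem.Dict.empty)
    = (pvC3fold l, pvC7fold l) := by
  unfold pvC3fold pvC7fold
  exact pvFoldlPair2 l (fun _ => [-3, -2, -1, 0, 1, 2, 3])
    (fun c cv dj => if -1 ≤ dj ∧ dj ≤ 1 then c.insert (cv.1.1, cv.1.2 + dj) (c.getD (cv.1.1, cv.1.2 + dj) 0 + cv.2) else c)
    (fun c cv dj => c.insert (cv.1.1, cv.1.2 + dj) (c.getD (cv.1.1, cv.1.2 + dj) 0 + cv.2))
    PySem.Dict.empty PySem.Dict.empty

-- B's per-cell gather sums compute pvT3 / pvT7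
lemma pvBn7 (l : List ((Int × Int) × Int)) (i j : Int) :
    (([-3, -2, -1, 0, 1, 2, 3] : List Int).map (fun di => (pvC7fold l).getD (i + di, j) 0)).sum
      = pvT7 l i j := by
  rw [List.map_congr_left fun di _ => pvC7 l (i + di, j), pvSumSwap]
  exact congrArg List.sum (List.map_congr_left fun cv _ => pvB7di i j cv.1.1 cv.1.2 cv.2)

lemma pvBn3 (l : List ((Int × Int) × Int)) (i j : Int) :
    (([-1, 0, 1] : List Int).map (fun di => (pvC3fold l).getD (i + di, j) 0)).sum
      = pvT3 l i j := by
  rw [List.map_congr_left fun di _ => pvC3 l (i + di, j), pvSumSwap]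
  exact congrArg List.sum (List.map_congr_left fun cv _ => pvB3di i j cv.1.1 cv.1.2 cv.2)

-- ===== VERDICT (by name: the statement is the Claim_ definition above) =====
theorem calculate_N3_N7_spec : Claim_equal_calculate_N3_N7 := by
  intro cell_sizes cellSideLength _
  unfold Spec_calculate_N3_N7 calculate_N3_N7 calculate_N3_N7_alt
  simp only [pvR7, pvR3]
  have hn : ((pvToDict cell_sizes).items.map Prod.fst).Nodup := by
    have := PySem.Dict.nodup_keys_ofList (cell_sizes.map (fun t => ((t.1, t.2.1), t.2.2)))
    simpa [PySem.Dict.keys, pvToDict] using this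
  rw [pvFoldlAppendMap, List.nil_append]
  rw [pvBuildSplit (pvToDict cell_sizes).items]
  refine List.map_congr_left fun cv _ => ?_
  rw [pvAcell (pvToDict cell_sizes) hn cv.1.1 cv.1.2]
  have h3 := pvBn3 (pvToDict cell_sizes).items cv.1.1 cv.1.2
  have h7 := pvBn7 (pvToDict cell_sizes).items cv.1.1 cv.1.2
  simp only [Prod.mk.injEq]
  exact ⟨trivial, h3.symm, h7.symm⟩
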